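-- pv_equiv track=rewrite | github.com/mrezzamoradi/Bioinformatics_Algorithms_Part1 | _202_ProteinTranslation.py | ribosome
-- ===== SOURCE A (Python) =====
-- def ribosome(m_rna, codon_table):
--     """
--     Simulates the function of a ribosome. Translates messenger RNA 'm_rna' into a polypeptide
--
--     :param m_rna:
--     :type m_rna: str
--     :return:
--     :rtype: str
--
--     Sample Input:
--     AUGGCCAUGGCGCCCAGAACUGAGAUCAAUAGUACCCGUAUUAACGGGUGA
--
--     Sample Output:
--     MAMAPRTEINSTRING
--     """
--
--     rna_length = len(m_rna)
--     aminoacid = ''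
--     polypeptide = ''
--
--     i = 0
--     while (aminoacid != '*') and (i < rna_length):
--         codon = m_rna[i:i+3]
--         aminoacid = codon_table[codon]
--
--         if aminoacid != '*':
--             polypeptide += aminoacid
--
--         i += 3
--
--     return polypeptide
-- ===== SOURCE B (Python) =====
-- def ribosome(m_rna, codon_table):
--     # Recursive decomposition: translate the leading codon, then recurse on the
--     # suffix; no index counter, no sentinel variable, no accumulator.
--     if not m_rna:
--         return ''
--     aminoacid = codon_table[m_rna[:3]]
--     if aminoacid == '*':
--         return ''
--     return aminoacid + ribosome(m_rna[3:], codon_table)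
-- ===== Notes on version B (the rewrite author's own statement) =====
-- stated objective: alternative
-- what changed: Replaced A's index/sentinel while-loop with an accumulator by a direct recursion on the string suffix: translate the head codon and prepend it to the recursive translation of the rest, stopping at the stop codon or the empty string.
import Mathlib
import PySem

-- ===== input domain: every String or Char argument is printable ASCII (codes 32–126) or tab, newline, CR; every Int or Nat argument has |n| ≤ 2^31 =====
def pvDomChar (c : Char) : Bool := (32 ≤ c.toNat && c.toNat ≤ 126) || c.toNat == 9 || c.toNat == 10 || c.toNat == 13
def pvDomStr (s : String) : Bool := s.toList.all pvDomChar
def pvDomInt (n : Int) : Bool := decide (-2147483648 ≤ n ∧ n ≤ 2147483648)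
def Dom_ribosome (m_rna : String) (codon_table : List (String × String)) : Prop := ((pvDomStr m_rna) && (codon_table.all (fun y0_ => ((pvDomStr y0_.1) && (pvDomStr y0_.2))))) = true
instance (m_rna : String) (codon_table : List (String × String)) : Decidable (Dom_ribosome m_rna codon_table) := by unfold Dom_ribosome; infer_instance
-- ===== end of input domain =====

-- B replaces A's index/sentinel/accumulator while-loop by a direct recursion on the string
-- suffix (translate head codon, prepend to recursive translation of the rest); same cost.

-- ===== PORT A =====
-- the while-loop of A, one fuel tick per iteration (fuel ≥ number of iterations at the call site);
-- codon_table[codon] is ported as Dict.getD — the KeyError case is excluded by Pre_ribosome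
def ribosomeLoop (m_rna : String) (d : PySem.Dict String String) (rna_length : Int)
    (aminoacid polypeptide : String) (i : Int) : Nat → String
  | 0 => polypeptide
  | fuel + 1 =>
    if aminoacid ≠ "*" ∧ i < rna_length then
      let codon := PySem.Str.slice m_rna (some i) (some (i + 3))
      let aminoacid' := d.getD codon ""
      let polypeptide' := if aminoacid' ≠ "*" then polypeptide ++ aminoacid' else polypeptide
      ribosomeLoop m_rna d rna_length aminoacid' polypeptide' (i + 3) fuel
    else polypeptide

def ribosome (m_rna : String) (codon_table : List (String × String)) : String :=
  let rna_length := PySem.Str.len m_rna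
  ribosomeLoop m_rna (PySem.Dict.mk codon_table) rna_length "" "" 0 (m_rna.toList.length + 1)

-- ===== PORT B =====
-- recursion on the suffix (the char list of the string): codon = s[:3], recurse on s[3:]
def ribosomeAltGo (d : PySem.Dict String String) : List Char → String
  | [] => ""
  | c :: cs =>
    let aminoacid := d.getD (String.ofList ((c :: cs).take 3)) ""
    if aminoacid = "*" then "" else aminoacid ++ ribosomeAltGo d (cs.drop 2)
termination_by l => l.length
decreasing_by simp

def ribosome_alt (m_rna : String) (codon_table : List (String × String)) : String :=
  ribosomeAltGo (PySem.Dict.mk codon_table) m_rna.toList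

-- ===== PRECONDITION & SPEC =====
-- Pre_ excludes exactly the inputs on which Python A raises KeyError: some codon read before
-- (or at) the first stop codon is missing from the table.
def Pre_ribosome (m_rna : String) (codon_table : List (String × String)) : Prop :=
  ((((PySem.List.pyRange 0 (PySem.Str.len m_rna) 3).map
      (fun i => (PySem.Dict.mk codon_table).get? (PySem.Str.slice m_rna (some i) (some (i + 3))))).takeWhile
      (fun o => o != some "*")).all (fun o => o.isSome)) = true
instance (m_rna : String) (codon_table : List (String × String)) : Decidable (Pre_ribosome m_rna codon_table) := by unfold Pre_ribosome; infer_instance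

def pvWitness_ribosome : String × (List (String × String)) :=
  ("AUGGCCUGA", [("AUG", "M"), ("GCC", "A"), ("UGA", "*")])

def Spec_ribosome (m_rna : String) (codon_table : List (String × String)) (out : String) : Prop := out = ribosome_alt m_rna codon_table
instance (m_rna : String) (codon_table : List (String × String)) (out : String) : Decidable (Spec_ribosome m_rna codon_table out) := by unfold Spec_ribosome; infer_instance

-- ===== CLAIM (what is proved, stated in full; the proofs are below) =====
def Claim_equal_ribosome : Prop := ∀ (m_rna : String) (codon_table : List (String × String)), Dom_ribosome m_rna codon_table → Pre_ribosome m_rna codon_table → Spec_ribosome m_rna codon_table (ribosome m_rna codon_table)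

-- ===== LEMMAS AND PROOFS =====

-- equation lemmas for the well-founded recursion of B's port
lemma go_nil (d : PySem.Dict String String) : ribosomeAltGo d [] = "" := by
  rw [ribosomeAltGo]

lemma go_cons (d : PySem.Dict String String) (c : Char) (cs : List Char) :
    ribosomeAltGo d (c :: cs)
      = (let aminoacid := d.getD (String.ofList ((c :: cs).take 3)) "";
         if aminoacid = "*" then "" else aminoacid ++ ribosomeAltGo d (cs.drop 2)) := by
  rw [ribosomeAltGo]

-- once the aminoacid state is "*", the loop returns the accumulator whatever the fuel
lemma ribosomeLoop_stop (m_rna : String) (d : PySem.Dict String String) (rl : Int)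
    (poly : String) (i : Int) (fuel : Nat) :
    ribosomeLoop m_rna d rl "*" poly i fuel = poly := by
  cases fuel with
  | zero => rfl
  | succ n => simp [ribosomeLoop]

-- A's codon slice at a nonnegative index is the take-3 of the dropped suffix
lemma slice_codon (m_rna : String) (a : Int) (ha : 0 ≤ a) :
    PySem.Str.slice m_rna (some a) (some (a + 3))
      = String.ofList ((m_rna.toList.drop a.toNat).take 3) := by
  apply String.toList_inj.mp
  rw [PySem.Str.toList_slice, PySem.Chars.slice_eq_listSlice,
      PySem.List.slice_toNat (ha := ha) (hb := by omega)]
  simp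
  congr 1
  omega

-- loop invariant: with a non-stop aminoacid state and enough fuel, the loop appends to the
-- accumulator exactly B's recursive translation of the remaining suffix
lemma ribosomeLoop_eq (m_rna : String) (d : PySem.Dict String String) :
    ∀ (fuel : Nat) (a : Int) (aa poly : String), aa ≠ "*" → 0 ≤ a →
      PySem.Str.len m_rna ≤ a + 3 * fuel →
      ribosomeLoop m_rna d (PySem.Str.len m_rna) aa poly a fuel
        = poly ++ ribosomeAltGo d (m_rna.toList.drop a.toNat) := by
  intro fuel
  induction fuel with
  | zero =>
    intro a aa poly haa ha hle
    rw [PySem.Str.len_eq] at hle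
    rw [List.drop_eq_nil_of_le (by omega)]
    simp [ribosomeLoop, go_nil]
  | succ n ih =>
    intro a aa poly haa ha hle
    rw [PySem.Str.len_eq] at hle
    by_cases hlt : a < PySem.Str.len m_rna
    · have hlen : a.toNat < m_rna.toList.length := by
        rw [PySem.Str.len_eq] at hlt; omega
      obtain ⟨c, cs, hcs⟩ := List.exists_cons_of_ne_nil
        (fun h => by rw [List.drop_eq_nil_iff] at h; omega :
          m_rna.toList.drop a.toNat ≠ [])
      simp only [ribosomeLoop, if_pos (And.intro haa hlt)]
      rw [slice_codon m_rna a ha, hcs, go_cons]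
      set v := d.getD (String.ofList ((c :: cs).take 3)) "" with hv
      by_cases hstar : v = "*"
      · rw [hstar]
        simp only [if_neg (by simp : ¬ ("*" : String) ≠ "*")]
        rw [ribosomeLoop_stop]
        simp
      · simp only [if_pos hstar, if_neg hstar]
        rw [ih (a + 3) v (poly ++ v) hstar (by omega) (by rw [PySem.Str.len_eq]; omega)]
        have hdrop : m_rna.toList.drop (a + 3).toNat = cs.drop 2 := by
          have : (a + 3).toNat = a.toNat + 3 := by omega
          rw [this, ← List.drop_drop, hcs]
          simp [List.drop]
        rw [hdrop, String.append_assoc]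
    · rw [PySem.Str.len_eq] at hlt
      rw [List.drop_eq_nil_of_le (by omega)]
      simp only [ribosomeLoop, go_nil]
      rw [if_neg (fun h => hlt h.2)]
      simp

-- ===== VERDICT (by name: the statement is the Claim_ definition above) =====
theorem ribosome_spec : Claim_equal_ribosome := by
  intro m_rna codon_table _ _
  unfold Spec_ribosome ribosome ribosome_alt
  rw [ribosomeLoop_eq m_rna (PySem.Dict.mk codon_table) (m_rna.toList.length + 1) 0 "" ""
        (by decide) (by omega) (by rw [PySem.Str.len_eq]; omega)]
  simp
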